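-- pv_equiv track=rewrite | github.com/diliadis/DTI_prediction | chembl_preprocessing.py | act_inact_counter
-- ===== SOURCE A (Python) =====
-- def act_inact_counter(elements_list):
--     active_counter = 0
--     inact_counter = 0
--     for element_id, activity in elements_list:
--         if activity == '1':
--             inact_counter += 1
--         elif activity == '3':
--             active_counter += 1
--     return active_counter, inact_counter
-- ===== SOURCE B (Python) =====
-- def act_inact_counter(elements_list):
--     activities = [activity for _, activity in elements_list]
--     return activities.count('3'), activities.count('1')
-- ===== Notes on version B (the rewrite author's own statement) =====
-- stated objective: idiomatic
-- what changed: B has no loop or accumulator at all: it projects the activity column once, then obtains each result by a separate list.count('3') / list.count('1') pass, replacing A's single if/elif accumulator loop with staged extract-then-count passes.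
import Mathlib
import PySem

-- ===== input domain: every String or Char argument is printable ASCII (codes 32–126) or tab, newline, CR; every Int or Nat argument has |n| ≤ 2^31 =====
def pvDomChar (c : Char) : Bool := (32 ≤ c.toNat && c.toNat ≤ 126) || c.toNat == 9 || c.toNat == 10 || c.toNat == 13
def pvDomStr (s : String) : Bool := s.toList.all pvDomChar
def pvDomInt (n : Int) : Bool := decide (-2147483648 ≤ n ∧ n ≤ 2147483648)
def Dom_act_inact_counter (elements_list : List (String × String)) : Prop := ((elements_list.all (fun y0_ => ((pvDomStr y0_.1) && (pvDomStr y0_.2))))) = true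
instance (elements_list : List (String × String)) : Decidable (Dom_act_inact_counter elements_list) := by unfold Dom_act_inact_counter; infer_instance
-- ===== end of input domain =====

-- B replaces A's single if/elif accumulator loop with staged passes: project the activity column, then count '3' and count '1' separately (idiomatic, same cost).

-- ===== PORT A =====
-- per-element step of A's for-loop (if/elif on the activity), kept as a named helper
def actStep (acc : Int × Int) (p : String × String) : Int × Int :=
  if p.2 == "1" then (acc.1, acc.2 + 1)
  else if p.2 == "3" then (acc.1 + 1, acc.2)
  else acc

def act_inact_counter (elements_list : List (String × String)) : Int × Int :=
  let st := elements_list.foldl actStep (0, 0)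
  (st.1, st.2)

-- ===== PORT B =====
def act_inact_counter_alt (elements_list : List (String × String)) : Int × Int :=
  let activities := elements_list.map (fun p => p.2)
  ((PySem.List.count activities "3" : Int), (PySem.List.count activities "1" : Int))

-- ===== PRECONDITION & SPEC =====
def Spec_act_inact_counter (elements_list : List (String × String)) (out : Int × Int) : Prop := out = act_inact_counter_alt elements_list
instance (elements_list : List (String × String)) (out : Int × Int) : Decidable (Spec_act_inact_counter elements_list out) := by unfold Spec_act_inact_counter; infer_instance

-- ===== CLAIM =====
def Claim_equal_act_inact_counter : Prop := ∀ (elements_list : List (String × String)), Dom_act_inact_counter elements_list → Spec_act_inact_counter elements_list (act_inact_counter elements_list)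

-- ===== LEMMAS AND PROOFS =====

theorem act_inact_counter_foldl (l : List (String × String)) (a b : Int) :
    l.foldl actStep (a, b)
    = (a + ((l.map Prod.snd).count "3" : Int), b + ((l.map Prod.snd).count "1" : Int)) := by
  induction l generalizing a b with
  | nil => simp
  | cons p t ih =>
    simp only [List.foldl_cons, List.map_cons, List.count_cons]
    by_cases h1 : p.2 = "1"
    · rw [show actStep (a, b) p = (a, b + 1) by simp [actStep, h1], ih]
      simp [h1, Prod.ext_iff]
      ring
    · by_cases h3 : p.2 = "3"
      · rw [show actStep (a, b) p = (a + 1, b) by simp [actStep, h3], ih]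
        simp [h3, Prod.ext_iff]
        ring
      · rw [show actStep (a, b) p = (a, b) by simp [actStep, h1, h3], ih]
        simp [h1, h3]

-- ===== VERDICT =====
theorem act_inact_counter_spec : Claim_equal_act_inact_counter := by
  intro l _
  unfold Spec_act_inact_counter act_inact_counter act_inact_counter_alt
  simp only [act_inact_counter_foldl, PySem.List.count_eq, zero_add]
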